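-- pv_equiv track=rewrite | github.com/Yizhou-Jack/Leetcode-Python | Python/Leetcode/1546_MaxNumberofNonOverlapSubarrayWithTarget.py | maxNonOverlapping1
-- ===== SOURCE A (Python) =====
-- from typing import List
--
-- def maxNonOverlapping1(nums: List[int], target: int) -> int:
--     n = len(nums)
--     preSum = [0] * (n + 1)
--     for i in range(n):
--         preSum[i + 1] = preSum[i] + nums[i]
--
--     hashMap = {0: 0}
--     res = 0
--     for i in range(1, n + 1):
--         curr = preSum[i]
--         prev = curr - target
--         if prev in hashMap:
--             res += 1
--             hashMap = {}
--         hashMap[curr] = i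
--     return res
-- ===== SOURCE B (Python) =====
-- def maxNonOverlapping1(nums, target):
--     # recursive decomposition: scan with a running sum until the first subarray
--     # summing to target ends, then count 1 and recurse on the remaining suffix
--     def count(xs):
--         s = 0
--         seen = {0}
--         for k, x in enumerate(xs):
--             s += x
--             if s - target in seen:
--                 return 1 + count(xs[k + 1:])
--             seen.add(s)
--         return 0
--     return count(nums)
-- ===== Notes on version B (the rewrite author's own statement) =====
-- stated objective: simpler
-- what changed: Replaces the precomputed prefix-sum array plus index-keyed dict loop by a recursive decomposition: one running-sum scan with a set of seen sums that, on the first hit, counts 1 and recurses on the remaining suffix with fresh state.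
import Mathlib
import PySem

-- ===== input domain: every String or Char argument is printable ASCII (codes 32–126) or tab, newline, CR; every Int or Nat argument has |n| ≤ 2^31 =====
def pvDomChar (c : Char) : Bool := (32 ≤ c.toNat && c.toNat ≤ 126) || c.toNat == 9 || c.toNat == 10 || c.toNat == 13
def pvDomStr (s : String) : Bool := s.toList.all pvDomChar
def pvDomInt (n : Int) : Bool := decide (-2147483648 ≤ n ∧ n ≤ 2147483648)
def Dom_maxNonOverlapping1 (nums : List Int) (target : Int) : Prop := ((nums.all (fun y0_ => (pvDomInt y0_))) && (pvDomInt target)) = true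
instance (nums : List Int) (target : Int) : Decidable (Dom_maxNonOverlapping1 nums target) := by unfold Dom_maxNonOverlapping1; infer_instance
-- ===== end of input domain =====

-- B replaces A's prefix-sum array + index-keyed dict with a recursive running-sum scan
-- over the input (set of seen sums; on a hit count 1 and recurse on the remaining suffix).

-- ===== PORT A =====
-- body of 'for i in range(n): preSum[i+1] = preSum[i] + nums[i]'
def pvBuildStep (nums : List Int) (ps : List Int) (i : Int) : List Int :=
  PySem.List.pySetD ps (i + 1) (PySem.List.pyGetD ps i 0 + PySem.List.pyGetD nums i 0)

-- body of 'for i in range(1, n+1): …'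
def pvLoopStep (target : Int) (preSum : List Int)
    (st : PySem.Dict Int Int × Int) (i : Int) : PySem.Dict Int Int × Int :=
  let curr := PySem.List.pyGetD preSum i 0
  let prev := curr - target
  let st1 := if st.1.contains prev then ((PySem.Dict.empty : PySem.Dict Int Int), st.2 + 1) else st
  (st1.1.insert curr i, st1.2)

def maxNonOverlapping1 (nums : List Int) (target : Int) : Int :=
  let n : Int := nums.length
  let preSum := (PySem.List.pyRange 0 n 1).foldl (pvBuildStep nums) (List.replicate (n + 1).toNat 0)
  ((PySem.List.pyRange 1 (n + 1) 1).foldl (pvLoopStep target preSum)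
      (PySem.Dict.ofList [((0 : Int), (0 : Int))], (0 : Int))).2

-- ===== PORT B =====
-- the scan of Source B's 'count': running sum s, set 'seen'; on a hit, 1 + restart on the suffix
def pvAltScan (target : Int) : List Int → Int → PySem.Set Int → Int
  | [], _, _ => 0
  | x :: rest, s, seen =>
    let s' := s + x
    if PySem.Set.contains seen (s' - target) then
      1 + pvAltScan target rest 0 (PySem.Set.ofList [0])
    else
      pvAltScan target rest s' (PySem.Set.add seen s')

def maxNonOverlapping1_alt (nums : List Int) (target : Int) : Int :=
  pvAltScan target nums 0 (PySem.Set.ofList [0])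

-- ===== PRECONDITION & SPEC =====
def Spec_maxNonOverlapping1 (nums : List Int) (target : Int) (out : Int) : Prop := out = maxNonOverlapping1_alt nums target
instance (nums : List Int) (target : Int) (out : Int) : Decidable (Spec_maxNonOverlapping1 nums target out) := by unfold Spec_maxNonOverlapping1; infer_instance

-- ===== CLAIM (what is proved, stated in full; the proofs are below) =====
def Claim_equal_maxNonOverlapping1 : Prop := ∀ (nums : List Int) (target : Int), Dom_maxNonOverlapping1 nums target → Spec_maxNonOverlapping1 nums target (maxNonOverlapping1 nums target)

-- ===== LEMMAS AND PROOFS =====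

-- the list of running prefix sums a+x1, a+x1+x2, … of l
def pvPreTail (a : Int) : List Int → List Int
  | [] => []
  | x :: r => (a + x) :: pvPreTail (a + x) r

lemma pvPreTail_length (a : Int) (l : List Int) : (pvPreTail a l).length = l.length := by
  induction l generalizing a with
  | nil => rfl
  | cons x r ih => simp [pvPreTail, ih]

-- A's first loop builds exactly 0 :: pvPreTail 0 nums
lemma pvBuild_suffix (nums : List Int) : ∀ (ys c D : List Int) (a : Int),
    nums = c ++ ys → D.length = c.length + 1 → D.getD c.length 0 = a →
    (PySem.List.pyRange (c.length : Int) ((c.length : Int) + ys.length) 1).foldl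
      (pvBuildStep nums) (D ++ List.replicate ys.length 0)
    = D ++ pvPreTail a ys := by
  intro ys
  induction ys with
  | nil => intro c D a h1 h2 h3; simp [PySem.List.pyRange_one_eq_nil, pvPreTail]
  | cons y r ih =>
    intro c D a hnums hlen hlast
    rw [PySem.List.pyRange_one_cons (by simp)]
    simp only [List.foldl_cons]
    have hstep : pvBuildStep nums (D ++ List.replicate (y :: r).length 0) (c.length : Int)
        = (D ++ [a + y]) ++ List.replicate r.length 0 := by
      have hg1 : PySem.List.pyGetD (D ++ List.replicate (y :: r).length 0) (c.length : Int) 0 = a := by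
        rw [PySem.List.pyGetD_natCast]
        rw [← hlast]
        simp [List.getD_eq_getElem?_getD, List.getElem?_append_left (by omega : c.length < D.length)]
      have hg2 : PySem.List.pyGetD nums (c.length : Int) 0 = y := by
        subst hnums
        simp [PySem.List.pyGetD_natCast, List.getD_eq_getElem?_getD]
      have hcast : ((c.length : Int) + 1) = ((D.length : Nat) : Int) := by omega
      rw [pvBuildStep, hg1, hg2, hcast, PySem.List.pySetD_natCast]
      simp [List.replicate_succ]
    rw [hstep]
    have h2 := ih (c ++ [y]) (D ++ [a + y]) (a + y)
      (by simp [hnums]) (by simp [hlen]) (by simp [List.getD_eq_getElem?_getD, hlen])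
    simp only [List.length_append, List.length_cons, List.length_nil] at h2 ⊢
    push_cast at h2 ⊢
    have e : ((c.length : Int) + 1 + (r.length : Int)) = (c.length : Int) + ((r.length : Int) + 1) := by ring
    rw [e] at h2
    rw [h2]
    simp [pvPreTail]

-- A's second loop as a structural recursion over the prefix-sum values
def pvListLoop (target : Int) : List Int → Int → (PySem.Dict Int Int × Int) → (PySem.Dict Int Int × Int)
  | [], _, st => st
  | y :: r, i, st =>
    let st1 := if st.1.contains (y - target) then ((PySem.Dict.empty : PySem.Dict Int Int), st.2 + 1) else st
    pvListLoop target r (i + 1) (st1.1.insert y i, st1.2)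

lemma pvLoop_suffix (target : Int) : ∀ (ys c : List Int) (st : PySem.Dict Int Int × Int),
    (PySem.List.pyRange (c.length : Int) ((c.length : Int) + ys.length) 1).foldl
      (pvLoopStep target (c ++ ys)) st
    = pvListLoop target ys (c.length : Int) st := by
  intro ys
  induction ys with
  | nil => intro c st; simp [PySem.List.pyRange_one_eq_nil, pvListLoop]
  | cons y r ih =>
    intro c st
    rw [PySem.List.pyRange_one_cons (by simp)]
    simp only [List.foldl_cons]
    have h1 : PySem.List.pyGetD (c ++ y :: r) (c.length : Int) 0 = y := by
      simp [PySem.List.pyGetD_natCast, List.getD_eq_getElem?_getD]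
    have h2 := ih (c ++ [y]) (pvLoopStep target (c ++ y :: r) st (c.length : Int))
    simp only [List.append_assoc, List.cons_append, List.nil_append, List.length_append,
      List.length_cons, List.length_nil] at h2 ⊢
    push_cast at h2 ⊢
    have e : ((c.length : Int) + 1 + (r.length : Int)) = (c.length : Int) + ((r.length : Int) + 1) := by ring
    rw [e] at h2
    rw [h2]
    simp only [pvListLoop, pvLoopStep, h1]

-- Python's seen.add(v): membership of the grown set
lemma pvSet_contains_add (seen : PySem.Set Int) (w v : Int) :
    PySem.Set.contains (PySem.Set.add seen v) w = (PySem.Set.contains seen w || (w == v)) := by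
  by_cases h : PySem.Set.contains seen v = true
  · rw [PySem.Set.add, if_pos h]
    by_cases hw : w = v
    · simp [PySem.Set.contains] at h ⊢
      simp [hw, h]
    · simp [hw]
  · rw [PySem.Set.add, if_neg h]
    simp [PySem.Set.contains]
    by_cases hw : w = v <;> simp [hw]

-- main invariant: A's dict keys are B's seen-set shifted by the running base a - s
lemma pvAgree (target : Int) : ∀ (l : List Int) (a s i res : Int)
    (hm : PySem.Dict Int Int) (seen : PySem.Set Int),
    (∀ k : Int, hm.contains k = PySem.Set.contains seen (k - (a - s))) →
    (pvListLoop target (pvPreTail a l) i (hm, res)).2 = res + pvAltScan target l s seen := by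
  intro l
  induction l with
  | nil => intro a s i res hm seen hinv; simp [pvPreTail, pvListLoop, pvAltScan]
  | cons x r ih =>
    intro a s i res hm seen hinv
    simp only [pvPreTail, pvListLoop, pvAltScan]
    have hcond : hm.contains (a + x - target) = PySem.Set.contains seen (s + x - target) := by
      rw [hinv]
      congr 1
      ring
    rw [hcond]
    by_cases hc : PySem.Set.contains seen (s + x - target) = true
    · simp only [hc, if_true]
      rw [ih (a + x) 0 (i + 1) (res + 1) _ (PySem.Set.ofList [0]) ?_]
      · ring
      · intro k
        by_cases hk : k = a + x
        · simp [hk, PySem.Set.contains, PySem.Set.ofList]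
        · simp [PySem.Dict.contains_insert, PySem.Set.contains, PySem.Set.ofList]
          simp [Int.sub_eq_zero, hk]
    · rw [Bool.not_eq_true] at hc
      simp only [hc, Bool.false_eq_true, ite_false]
      rw [ih (a + x) (s + x) (i + 1) res _ (PySem.Set.add seen (s + x)) ?_]
      intro k
      rw [PySem.Dict.contains_insert, pvSet_contains_add, hinv]
      have e : k - (a + x - (s + x)) = k - (a - s) := by ring
      rw [e]
      by_cases hk : k = a + x
      · have : k - (a - s) = s + x := by omega
        simp [hk]
        omega
      · have : ¬ (k - (a - s) = s + x) := by omega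
        have b1 : (k == a + x) = false := by simp [hk]
        have b2 : (k - (a - s) == s + x) = false := by simp [this]
        rw [b1, b2]
        simp

-- ===== VERDICT (by name: the statement is the Claim_ definition above) =====
theorem maxNonOverlapping1_spec : Claim_equal_maxNonOverlapping1 := by
  intro nums target _
  unfold Spec_maxNonOverlapping1
  simp only [maxNonOverlapping1, maxNonOverlapping1_alt]
  have hrep : List.replicate (((nums.length : Int)) + 1).toNat (0 : Int)
      = [0] ++ List.replicate nums.length 0 := by
    have h : (((nums.length : Int)) + 1).toNat = nums.length + 1 := by omega
    rw [h, List.replicate_succ]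
    rfl
  have hbuild := pvBuild_suffix nums nums [] [0] 0 rfl rfl rfl
  simp only [List.length_nil, Nat.cast_zero, zero_add] at hbuild
  rw [hrep, hbuild]
  have hloop := pvLoop_suffix target (pvPreTail 0 nums) [0] (PySem.Dict.ofList [((0 : Int), (0 : Int))], 0)
  simp only [List.length_cons, List.length_nil, pvPreTail_length, List.singleton_append] at hloop
  push_cast at hloop
  simp only [List.singleton_append]
  have e : ((nums.length : Int)) + 1 = 1 + (nums.length : Int) := by ring
  rw [e, hloop]
  rw [pvAgree target nums 0 0 1 0 (PySem.Dict.ofList [((0 : Int), (0 : Int))]) (PySem.Set.ofList [0]) ?_]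
  · simp
  · intro k
    by_cases hk : k = 0
    · simp only [hk, PySem.Dict.ofList]
      rw [show ((PySem.Dict.empty : PySem.Dict Int Int).update [(0, 0)]).contains 0 = true from by decide]
      simp [PySem.Set.contains, PySem.Set.ofList]
    · simp only [PySem.Dict.ofList]
      rw [show ∀ w, PySem.Set.contains (PySem.Set.ofList [(0:Int)]) w = decide (w = 0) from fun w => by simp [PySem.Set.contains, PySem.Set.ofList]]
      simp [PySem.Dict.update, PySem.Dict.contains_insert, hk]
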